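-- pv_equiv track=rewrite | github.com/ak4shp/T-Days-of-Code | day4/Find-Triangular-Sum-of-an-Array.py | triangularSum
-- ===== SOURCE A (Python) =====
-- def triangularSum(nums: list[int]) -> int:
--     n = len(nums)
--
--     # Edge cases
--     if n == 1:
--         return nums[0] % 10
--     elif n == 2:
--         return (nums[0] + nums[1]) % 10
--
--     # Take the Base_row for generating other rows
--     for j in range(n - 1):
--         res = []            # Dummy array
--         for i in range(len(nums) - 1):
--             curr = (nums[i] + nums[i + 1]) % 10   # Logic
--             res.append(curr)
--
--         nums = res.copy()   # Reduced arry for each iteration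
--
--     return nums[0]
-- ===== SOURCE B (Python) =====
-- def triangularSum(nums: list[int]) -> int:
--     # Closed form: the triangular reduction equals sum(C(n-1,i)*nums[i]) mod 10.
--     n = len(nums)
--     total = 0
--     c = 1  # running binomial C(n-1, i), maintained exactly
--     for i, x in enumerate(nums):
--         total += c * x
--         c = c * (n - 1 - i) // (i + 1)
--     return total % 10
-- ===== Notes on version B (the rewrite author's own statement) =====
-- stated objective: faster
-- what changed: Replaces the O(n^2) repeated adjacent-sum-mod-10 row reduction with the closed form sum(C(n-1,i)*nums[i]) % 10, maintaining the binomial coefficient exactly in one O(n) pass.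
import Mathlib
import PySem

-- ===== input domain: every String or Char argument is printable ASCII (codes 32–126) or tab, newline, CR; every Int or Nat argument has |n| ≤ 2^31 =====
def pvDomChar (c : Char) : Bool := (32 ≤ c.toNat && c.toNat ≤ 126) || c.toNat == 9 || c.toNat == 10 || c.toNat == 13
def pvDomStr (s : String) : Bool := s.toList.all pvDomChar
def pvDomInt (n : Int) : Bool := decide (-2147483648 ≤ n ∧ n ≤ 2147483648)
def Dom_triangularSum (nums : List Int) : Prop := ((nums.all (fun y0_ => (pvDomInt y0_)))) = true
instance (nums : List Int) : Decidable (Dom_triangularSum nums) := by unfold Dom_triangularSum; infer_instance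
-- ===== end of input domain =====

-- B replaces A's O(n^2) repeated adjacent-sum-mod-10 reduction by the closed form
-- sum(C(n-1,i)*nums[i]) % 10, computed in one pass with an exactly maintained binomial (faster).

-- ===== PORT A =====
-- inner loop: res = []; for i in range(len(nums)-1): res.append((nums[i]+nums[i+1]) % 10)
def pvRowA (cur : List Int) : List Int :=
  (PySem.List.pyRange 0 (PySem.List.len cur - 1) 1).foldl
    (fun res i =>
      res ++ [PySem.Int.mod (PySem.List.pyGetD cur i 0 + PySem.List.pyGetD cur (i + 1) 0) 10]) []

def triangularSum (nums : List Int) : Int :=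
  let n : Int := PySem.List.len nums
  if n = 1 then PySem.Int.mod (PySem.List.pyGetD nums 0 0) 10
  else if n = 2 then
    PySem.Int.mod (PySem.List.pyGetD nums 0 0 + PySem.List.pyGetD nums 1 0) 10
  else
    let fin := (PySem.List.pyRange 0 (n - 1) 1).foldl (fun cur _ => pvRowA cur) nums
    PySem.List.pyGetD fin 0 0

-- ===== PORT B =====
def triangularSum_alt (nums : List Int) : Int :=
  let n : Int := PySem.List.len nums
  let st := (PySem.List.enumerate nums 0).foldl
    (fun (tc : Int × Int) (p : Int × Int) =>
      (tc.1 + tc.2 * p.2, PySem.Int.floordiv (tc.2 * (n - 1 - p.1)) (p.1 + 1)))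
    (0, 1)
  PySem.Int.mod st.1 10

-- ===== PRECONDITION & SPEC =====
-- Pre_ excludes only the empty list, on which A raises IndexError (nums[0]).
def Pre_triangularSum (nums : List Int) : Prop := nums ≠ []
instance (nums : List Int) : Decidable (Pre_triangularSum nums) := by
  unfold Pre_triangularSum; infer_instance

def pvWitness_triangularSum : List Int := [3, 1, 4, 1, 5]

def Spec_triangularSum (nums : List Int) (out : Int) : Prop := out = triangularSum_alt nums
instance (nums : List Int) (out : Int) : Decidable (Spec_triangularSum nums out) := by
  unfold Spec_triangularSum; infer_instance

-- ===== CLAIM (what is proved, stated in full; the proofs are below) =====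
def Claim_equal_triangularSum : Prop :=
  ∀ (nums : List Int), Dom_triangularSum nums → Pre_triangularSum nums →
    Spec_triangularSum nums (triangularSum nums)

-- ===== LEMMAS AND PROOFS =====

-- clean model of A's inner loop
def rowM : List Int → List Int
  | a :: b :: t => PySem.Int.mod (a + b) 10 :: rowM (b :: t)
  | _ => []

-- same row operation in ZMod 10
def rowZ : List (ZMod 10) → List (ZMod 10)
  | a :: b :: t => (a + b) :: rowZ (b :: t)
  | _ => []

-- binomially weighted sum
def wsum (k : Nat) (l : List (ZMod 10)) : ZMod 10 :=
  ∑ i ∈ Finset.range l.length, (Nat.choose k i : ZMod 10) * l.getD i 0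

lemma foldl_const_iterate {α β : Type} (f : α → α) (l : List β) (init : α) :
    l.foldl (fun s _ => f s) init = f^[l.length] init := by
  induction l generalizing init with
  | nil => rfl
  | cons x t ih => simpa [Function.iterate_succ_apply] using ih (f init)

lemma rangeMap (cur : List Int) :
    (List.range (cur.length - 1)).map
      (fun k => PySem.Int.mod (cur.getD k 0 + cur.getD (k+1) 0) 10) = rowM cur := by
  match cur with
  | [] => rfl
  | [a] => rfl
  | a :: b :: t =>
    have h1 : (a :: b :: t).length - 1 = t.length + 1 := by simp
    rw [h1, List.range_succ_eq_map, List.map_cons, List.map_map]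
    have ih := rangeMap (b :: t)
    have h2 : (b :: t).length - 1 = t.length := by simp
    rw [h2] at ih
    simp only [rowM]
    congr 1

lemma pvRowA_eq (cur : List Int) : pvRowA cur = rowM cur := by
  unfold pvRowA
  rw [PySem.List.foldl_append_singleton_eq_map, PySem.List.pyRange_one]
  simp only [PySem.List.len_eq, zero_add, sub_zero, List.map_map, List.nil_append]
  rw [← rangeMap cur]
  have hl : ((cur.length : Int) - 1).toNat = cur.length - 1 := by omega
  rw [hl]
  apply List.map_congr_left
  intro k hk
  simp only [Function.comp]
  have h2 : (k : Int) + 1 = ((k+1 : Nat) : Int) := by push_cast; ring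
  rw [h2, PySem.List.pyGetD_natCast, PySem.List.pyGetD_natCast]

lemma cast_mod10 (a : Int) : ((PySem.Int.mod a 10 : Int) : ZMod 10) = (a : ZMod 10) := by
  rw [PySem.Int.mod_eq_emod_of_pos (a := a) (b := 10) (by norm_num), ZMod.intCast_eq_intCast_iff]
  exact Int.emod_emod_of_dvd a dvd_rfl

lemma cast_rowM (l : List Int) :
    (rowM l).map (Int.cast : Int → ZMod 10) = rowZ (l.map Int.cast) := by
  match l with
  | [] => rfl
  | [a] => rfl
  | a :: b :: t =>
    simp only [rowM, List.map_cons, rowZ, cast_mod10, Int.cast_add]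
    rw [show ((b:ZMod 10) :: List.map Int.cast t : List (ZMod 10)) = List.map (Int.cast : Int → ZMod 10) (b :: t) from rfl, ← cast_rowM (b :: t)]

lemma length_rowZ (l : List (ZMod 10)) : (rowZ l).length = l.length - 1 := by
  match l with
  | [] => rfl
  | [a] => rfl
  | a :: b :: t => simp [rowZ, length_rowZ (b :: t)]

lemma rowZ_getD (l : List (ZMod 10)) (i : Nat) (h : i + 1 < l.length) :
    (rowZ l).getD i 0 = l.getD i 0 + l.getD (i + 1) 0 := by
  match l, i with
  | a :: b :: t, 0 => rfl
  | a :: b :: t, (i+1) =>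
    simp only [rowZ, List.getD_cons_succ]
    exact rowZ_getD (b :: t) i (by simpa using h)

lemma rowM_mem_bounds (l : List Int) (x : Int) (hx : x ∈ rowM l) : 0 ≤ x ∧ x < 10 := by
  match l with
  | [] => cases hx
  | [a] => cases hx
  | a :: b :: t =>
    simp only [rowM, List.mem_cons] at hx
    rcases hx with h | h
    · subst h
      exact ⟨PySem.Int.mod_nonneg _ (by norm_num), PySem.Int.mod_lt _ (by norm_num)⟩
    · exact rowM_mem_bounds (b :: t) x h

lemma wsum_rowZ (l : List (ZMod 10)) (k : Nat) (hk : k + 1 < l.length) :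
    wsum k (rowZ l) = wsum (k + 1) l := by
  unfold wsum
  rw [length_rowZ]
  have h1 : ∀ i ∈ Finset.range (l.length - 1),
      (Nat.choose k i : ZMod 10) * (rowZ l).getD i 0
      = (Nat.choose k i : ZMod 10) * l.getD i 0 + (Nat.choose k i : ZMod 10) * l.getD (i+1) 0 := by
    intro i hi
    rw [rowZ_getD l i (by simp at hi; omega), mul_add]
  rw [Finset.sum_congr rfl h1, Finset.sum_add_distrib]
  have hA : ∑ i ∈ Finset.range (l.length - 1), (Nat.choose k i : ZMod 10) * l.getD i 0
      = ∑ i ∈ Finset.range l.length, (Nat.choose k i : ZMod 10) * l.getD i 0 := by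
    conv_rhs => rw [show l.length = (l.length - 1) + 1 by omega]
    rw [Finset.sum_range_succ, Nat.choose_eq_zero_of_lt (by omega)]
    simp
  rw [hA]
  conv_rhs => rw [show l.length = (l.length - 1) + 1 by omega, Finset.sum_range_succ']
  have h2 : ∀ i ∈ Finset.range (l.length - 1),
      (Nat.choose (k+1) (i+1) : ZMod 10) * l.getD (i+1) 0
      = (Nat.choose k i : ZMod 10) * l.getD (i+1) 0
        + (Nat.choose k (i+1) : ZMod 10) * l.getD (i+1) 0 := by
    intro i _
    rw [Nat.choose_succ_succ]
    push_cast
    ring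
  rw [Finset.sum_congr rfl h2, Finset.sum_add_distrib]
  have h3 : (∑ i ∈ Finset.range (l.length - 1), (Nat.choose k (i+1) : ZMod 10) * l.getD (i+1) 0)
      + (Nat.choose (k+1) 0 : ZMod 10) * l.getD 0 0
      = ∑ i ∈ Finset.range l.length, (Nat.choose k i : ZMod 10) * l.getD i 0 := by
    conv_rhs => rw [show l.length = (l.length - 1) + 1 by omega, Finset.sum_range_succ']
    norm_num
  rw [add_assoc, h3, add_comm]

lemma rowZ_iterate (m : Nat) : ∀ l : List (ZMod 10), l.length = m + 1 →
    rowZ^[m] l = [wsum m l] := by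
  induction m with
  | zero =>
    intro l hl
    match l, hl with
    | [a], _ =>
      simp [wsum]
  | succ m ih =>
    intro l hl
    rw [Function.iterate_succ_apply, ih (rowZ l) (by rw [length_rowZ, hl]; omega),
      wsum_rowZ l m (by omega)]

lemma choose_step (N s : Nat) (hs : s ≤ N) :
    PySem.Int.floordiv (((Nat.choose N s : Nat) : Int) * ((N : Int) + 1 - 1 - (s : Int)))
      ((s : Int) + 1) = ((Nat.choose N (s + 1) : Nat) : Int) := by
  have h1 : (N : Int) + 1 - 1 - (s : Int) = ((N - s : Nat) : Int) := by
    push_cast [hs]; ring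
  have h2 : ((Nat.choose N s : Nat) : Int) * ((N - s : Nat) : Int)
      = ((Nat.choose N (s + 1) : Nat) : Int) * ((s : Int) + 1) := by
    have h := Nat.choose_succ_right_eq N s
    have h' : ((Nat.choose N (s+1) * (s+1) : Nat) : Int) = ((Nat.choose N s * (N - s) : Nat) : Int) := by
      exact_mod_cast congrArg Nat.cast h
    push_cast at h'
    linarith
  rw [h1, h2, PySem.Int.floordiv_eq_ediv_of_pos (by positivity),
    Int.mul_ediv_cancel _ (by positivity)]

lemma foldB (N : Nat) (t : List Int) : ∀ (s : Nat) (total : Int), s + t.length = N + 1 →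
    ((PySem.List.enumerate t (s : Int)).foldl
      (fun (tc : Int × Int) (p : Int × Int) =>
        (tc.1 + tc.2 * p.2,
         PySem.Int.floordiv (tc.2 * ((N : Int) + 1 - 1 - p.1)) (p.1 + 1)))
      (total, ((Nat.choose N s : Nat) : Int))).1
    = total + ∑ i ∈ Finset.range t.length, ((Nat.choose N (s + i) : Nat) : Int) * t.getD i 0 := by
  induction t with
  | nil => intro s total _; simp [PySem.List.enumerate]
  | cons x t ih =>
    intro s total hs
    rw [PySem.List.enumerate_cons, List.foldl_cons]
    have hstep : PySem.Int.floordiv (((Nat.choose N s : Nat) : Int) * ((N : Int) + 1 - 1 - (s : Int)))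
        ((s : Int) + 1) = ((Nat.choose N (s + 1) : Nat) : Int) :=
      choose_step N s (by simp at hs; omega)
    have hcast : (s : Int) + 1 = ((s + 1 : Nat) : Int) := by push_cast; ring
    simp only [hstep]
    rw [hcast, ih (s+1) (total + ((Nat.choose N s : Nat) : Int) * x) (by simp at hs ⊢; omega)]
    rw [List.length_cons, Finset.sum_range_succ']
    simp only [List.getD_cons_succ, List.getD_cons_zero]
    have : ∀ i, s + 1 + i = s + (i + 1) := by omega
    simp only [this, Nat.add_zero]
    ring


lemma cast_iterate (k : Nat) : ∀ l : List Int,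
    (rowM^[k] l).map (Int.cast : Int → ZMod 10) = rowZ^[k] (l.map Int.cast) := by
  induction k with
  | zero => intro l; rfl
  | succ k ih =>
    intro l
    rw [Function.iterate_succ_apply, Function.iterate_succ_apply, ih (rowM l), cast_rowM]

-- instantiation of foldB at the start of the loop
lemma foldB0 (N : Nat) (t : List Int) (h : t.length = N + 1) :
    ((PySem.List.enumerate t 0).foldl
      (fun (tc : Int × Int) (p : Int × Int) =>
        (tc.1 + tc.2 * p.2,
         PySem.Int.floordiv (tc.2 * ((N : Int) + 1 - 1 - p.1)) (p.1 + 1)))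
      ((0 : Int), (1 : Int))).1
    = ∑ i ∈ Finset.range t.length, ((Nat.choose N i : Nat) : Int) * t.getD i 0 := by
  have h2 := foldB N t 0 0 (by omega)
  simpa using h2

-- B computes the binomial-weighted sum mod 10
lemma B_closed (nums : List Int) (h : nums ≠ []) :
    triangularSum_alt nums
    = PySem.Int.mod (∑ i ∈ Finset.range nums.length,
        ((Nat.choose (nums.length - 1) i : Nat) : Int) * nums.getD i 0) 10 := by
  have hne : nums.length ≠ 0 := fun hc => h (List.eq_nil_of_length_eq_zero hc)
  have hm : (PySem.List.len nums : Int) = ((nums.length - 1 : Nat) : Int) + 1 := by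
    simp only [PySem.List.len_eq]; omega
  unfold triangularSum_alt
  simp only [hm]
  rw [foldB0 (nums.length - 1) nums (by omega)]

-- ===== VERDICT (by name: the statement is the Claim_ definition above) =====
theorem triangularSum_spec : Claim_equal_triangularSum := by
  intro nums _ hpre
  unfold Spec_triangularSum
  rw [B_closed nums hpre]
  match nums, hpre with
  | [a], _ =>
    simp [triangularSum, PySem.List.len_eq, PySem.List.pyGetD_zero_cons]
  | [a, b], _ =>
    simp [triangularSum, PySem.List.len_eq, Finset.sum_range_succ]
    rfl
  | a :: b :: c :: t, _ =>
    set nums := a :: b :: c :: t with hnums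
    have hm3 : 3 ≤ nums.length := by simp [hnums]
    -- A takes the loop branch
    have hA : triangularSum nums
        = PySem.List.pyGetD ((PySem.List.pyRange 0 ((PySem.List.len nums) - 1) 1).foldl
            (fun cur _ => pvRowA cur) nums) 0 0 := by
      unfold triangularSum
      rw [if_neg (by simp [PySem.List.len_eq]; omega), if_neg (by simp [PySem.List.len_eq]; omega)]
    have hlen : (PySem.List.pyRange 0 ((PySem.List.len nums) - 1) 1).length = nums.length - 1 := by
      rw [PySem.List.length_pyRange_one]
      simp only [PySem.List.len_eq]
      omega
    have hfe : pvRowA = rowM := funext pvRowA_eq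
    have hfin : (PySem.List.pyRange 0 ((PySem.List.len nums) - 1) 1).foldl
        (fun cur _ => pvRowA cur) nums = rowM^[nums.length - 1] nums := by
      rw [foldl_const_iterate, hlen, hfe]
    -- the cast of the final row is the weighted sum
    have hz : (rowM^[nums.length - 1] nums).map (Int.cast : Int → ZMod 10)
        = [wsum (nums.length - 1) (nums.map Int.cast)] := by
      rw [cast_iterate, rowZ_iterate (nums.length - 1) (nums.map Int.cast)
        (by simp; omega)]
    obtain ⟨v, hv⟩ : ∃ v, rowM^[nums.length - 1] nums = [v] := by
      have hl1 : (rowM^[nums.length - 1] nums).length = 1 := by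
        have := congrArg List.length hz
        simpa using this
      match hx : rowM^[nums.length - 1] nums, hl1 with
      | [v], _ => exact ⟨v, rfl⟩
    have hvcast : (v : ZMod 10) = wsum (nums.length - 1) (nums.map Int.cast) := by
      rw [hv] at hz
      simpa using hz
    have hvb : 0 ≤ v ∧ v < 10 := by
      have h2 : nums.length - 1 = (nums.length - 2) + 1 := by omega
      have := hv
      rw [h2, Function.iterate_succ_apply'] at this
      exact rowM_mem_bounds _ v (by rw [this]; simp)
    -- the sum casts to the same weighted sum
    have hScast : ((∑ i ∈ Finset.range nums.length,
        ((Nat.choose (nums.length - 1) i : Nat) : Int) * nums.getD i 0 : Int) : ZMod 10)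
        = wsum (nums.length - 1) (nums.map Int.cast) := by
      unfold wsum
      rw [List.length_map]
      push_cast
      refine Finset.sum_congr rfl fun i hi => ?_
      congr 1
      rw [show ((0 : ZMod 10)) = ((0 : Int) : ZMod 10) from rfl, List.getD_map]
    -- both sides are reduced residues congruent mod 10, hence equal
    set S : Int := ∑ i ∈ Finset.range nums.length,
        ((Nat.choose (nums.length - 1) i : Nat) : Int) * nums.getD i 0 with hS
    have hmodb : 0 ≤ PySem.Int.mod S 10 ∧ PySem.Int.mod S 10 < 10 :=
      ⟨PySem.Int.mod_nonneg _ (by norm_num), PySem.Int.mod_lt _ (by norm_num)⟩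
    have hcc : ((v : Int) : ZMod 10) = ((PySem.Int.mod S 10 : Int) : ZMod 10) := by
      rw [cast_mod10, hvcast, hScast]
    rw [ZMod.intCast_eq_intCast_iff] at hcc
    have h10 : ((10 : Nat) : Int) = (10 : Int) := rfl
    have hveq : v % 10 = (PySem.Int.mod S 10) % 10 := by
      have := hcc
      unfold Int.ModEq at this
      simpa [h10] using this
    rw [Int.emod_eq_of_lt hvb.1 hvb.2, Int.emod_eq_of_lt hmodb.1 hmodb.2] at hveq
    rw [hA, hfin, hv, PySem.List.pyGetD_zero_cons]
    exact hveq
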